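-- pv_equiv track=rewrite | github.com/Shruti-Singhai/nlp-tasks | project/nlppro1.py | mvl
-- ===== SOURCE A (Python) =====
-- def mvl(text):
--     k = 0
--     l = 0
--     for i in text.split("."):
--         for j in i.split(" "):
--             k = len(j)
--             if k>l:
--                 l = k
--     return l
-- ===== SOURCE B (Python) =====
-- def mvl(text):
--     cur = 0
--     best = 0
--     for ch in text:
--         if ch == '.' or ch == ' ':
--             cur = 0
--         else:
--             cur += 1
--             best = max(best, cur)
--     return best
-- ===== Notes on version B (the rewrite author's own statement) =====
-- stated objective: alternative
-- what changed: Replaced the nested tokenization (split on dot, then split each piece on space, maxing token lengths) by a single streaming pass over the characters that tracks the current run length of non-separator characters and the best run seen; no intermediate token lists are built.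
import Mathlib
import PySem

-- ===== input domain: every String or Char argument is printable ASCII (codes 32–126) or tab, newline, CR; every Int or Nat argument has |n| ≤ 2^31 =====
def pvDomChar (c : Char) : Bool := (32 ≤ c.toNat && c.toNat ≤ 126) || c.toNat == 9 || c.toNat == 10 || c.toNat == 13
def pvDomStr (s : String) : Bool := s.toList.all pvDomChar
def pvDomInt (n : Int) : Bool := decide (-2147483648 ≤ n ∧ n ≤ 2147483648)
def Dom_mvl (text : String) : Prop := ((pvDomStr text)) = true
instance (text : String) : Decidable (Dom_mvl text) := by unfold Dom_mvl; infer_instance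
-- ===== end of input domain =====

-- B replaces A's nested split-on-dot / split-on-space tokenization by one streaming pass over
-- the characters, tracking the current run of non-separator characters and the best run so far
-- (objective: alternative — same result without building intermediate token lists).

-- ===== PORT A =====
def mvl (text : String) : Int :=
  ((PySem.Chars.splitOn text.toList ['.']).foldl
    (fun (kl : Int × Int) i =>
      (PySem.Chars.splitOn i [' ']).foldl
        (fun (kl : Int × Int) j =>
          ((j.length : Int), if (j.length : Int) > kl.2 then (j.length : Int) else kl.2))
        kl)
    ((0 : Int), (0 : Int))).2

-- ===== PORT B =====
def mvl_alt (text : String) : Int :=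
  (text.toList.foldl
    (fun (cb : Int × Int) ch =>
      if ch = '.' ∨ ch = ' ' then ((0 : Int), cb.2)
      else (cb.1 + 1, max cb.2 (cb.1 + 1)))
    ((0 : Int), (0 : Int))).2

-- ===== PRECONDITION & SPEC =====
def Spec_mvl (text : String) (out : Int) : Prop := out = mvl_alt text
instance (text : String) (out : Int) : Decidable (Spec_mvl text out) := by unfold Spec_mvl; infer_instance

-- ===== CLAIM (what is proved, stated in full; the proofs are below) =====
def Claim_equal_mvl : Prop := ∀ (text : String), Dom_mvl text → Spec_mvl text (mvl text)

-- ===== LEMMAS AND PROOFS =====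

-- Structural recursion computing what `PySem.Chars.splitOn s [c]` computes (proved below).
def splitC (c : Char) : List Char → List (List Char)
  | [] => [[]]
  | x :: xs => if x = c then [] :: splitC c xs else (splitC c xs).modifyHead (x :: ·)

lemma splitC_ne_nil (c : Char) (l : List Char) : splitC c l ≠ [] := by
  cases l with
  | nil => simp [splitC]
  | cons x xs =>
    simp only [splitC]
    split_ifs
    · simp
    · cases h : splitC c xs with
      | nil => exact absurd h (splitC_ne_nil c xs)
      | cons a b => simp [List.modifyHead]

lemma go_spec (c : Char) : ∀ (fuel : Nat) (l cur : List Char) (acc : List (List Char)),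
    l.length < fuel →
    PySem.Chars.splitOn.go [c] fuel l cur acc
      = acc.reverse ++ ((splitC c l).modifyHead (cur.reverse ++ ·)) := by
  intro fuel
  induction fuel with
  | zero => intro l cur acc h; omega
  | succ n ih =>
    intro l cur acc h
    cases l with
    | nil =>
      rw [PySem.Chars.splitOn.go.eq_def]
      simp [splitC, List.modifyHead]
    | cons x xs =>
      rw [PySem.Chars.splitOn.go.eq_def]
      by_cases hx : x = c
      · subst hx
        simp only [List.isPrefixOf, BEq.rfl, Bool.true_and, if_pos, List.length_cons,
          List.length_nil, List.drop_succ_cons, List.drop_zero]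
        rw [ih xs [] _ (by simpa using h)]
        simp only [splitC, List.modifyHead, List.reverse_nil, List.nil_append,
          List.reverse_cons, List.append_assoc, List.singleton_append]
        cases splitC x xs <;> simp
      · have : ([c].isPrefixOf (x :: xs)) = false := by
          simp [List.isPrefixOf]; exact fun hh => absurd (hh.symm) hx
        simp only [this, if_neg, Bool.false_eq_true, not_false_iff]
        rw [ih xs (x :: cur) acc (by simpa using h)]
        have hne := splitC_ne_nil c xs
        cases hsp : splitC c xs with
        | nil => exact absurd hsp hne
        | cons a b =>
          simp [splitC, if_neg hx, hsp, List.modifyHead]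

lemma splitOn_eq (c : Char) (s : List Char) : PySem.Chars.splitOn s [c] = splitC c s := by
  rw [PySem.Chars.splitOn]
  rw [go_spec c (s.length + 1) s [] [] (by omega)]
  cases h : splitC c s with
  | nil => exact absurd h (splitC_ne_nil c s)
  | cons a b => simp [List.modifyHead]

def pySepB (c : Char) : Bool := c = '.' || c = ' '

-- Split on either separator at once: the pieces are the maximal separator-free runs.
def splitP : List Char → List (List Char)
  | [] => [[]]
  | x :: xs => if pySepB x then [] :: splitP xs else (splitP xs).modifyHead (x :: ·)

lemma splitP_ne_nil (l : List Char) : splitP l ≠ [] := by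
  cases l with
  | nil => simp [splitP]
  | cons x xs =>
    simp only [splitP]
    split_ifs
    · simp
    · cases h : splitP xs with
      | nil => exact absurd h (splitP_ne_nil xs)
      | cons a b => simp [List.modifyHead]

lemma flatMap_split (cs : List Char) :
    (splitC '.' cs).flatMap (fun i => splitC ' ' i) = splitP cs := by
  induction cs with
  | nil => simp [splitC, splitP]
  | cons x xs ih =>
    by_cases hd : x = '.'
    · subst hd
      simp only [splitC, if_pos rfl, splitP, pySepB, List.flatMap_cons]
      simp [splitC, ih]
    · cases hsp : splitC '.' xs with
      | nil => exact absurd hsp (splitC_ne_nil '.' xs)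
      | cons a b =>
        by_cases hs : x = ' '
        · subst hs
          have h1 : splitC '.' (' ' :: xs) = (' ' :: a) :: b := by
            simp [splitC, hd, hsp, List.modifyHead]
          have h2 : splitC ' ' (' ' :: a) = [] :: splitC ' ' a := by simp [splitC]
          have h3 : splitP (' ' :: xs) = [] :: splitP xs := by simp [splitP, pySepB]
          rw [h1, List.flatMap_cons, h2, h3, ← ih, hsp, List.flatMap_cons]
          simp
        · have h1 : splitC '.' (x :: xs) = (x :: a) :: b := by
            simp [splitC, hd, hsp, List.modifyHead]
          have h2 : splitC ' ' (x :: a) = (splitC ' ' a).modifyHead (x :: ·) := by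
            simp [splitC, hs]
          have h3 : splitP (x :: xs) = (splitP xs).modifyHead (x :: ·) := by
            simp [splitP, pySepB, hd, hs]
          rw [h1, List.flatMap_cons, h2, h3, ← ih, hsp, List.flatMap_cons]
          cases hsc : splitC ' ' a with
          | nil => exact absurd hsc (splitC_ne_nil ' ' a)
          | cons p q => simp [hsc, List.modifyHead]

-- Longest separator-free run of cs, given the length `cur` of the run in progress.
def Mrun : List Char → Int → Int
  | [], cur => cur
  | c :: cs, cur => if pySepB c then max cur (Mrun cs 0) else Mrun cs (cur + 1)

lemma Mrun_ge : ∀ (cs : List Char) (cur : Int), cur ≤ Mrun cs cur := by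
  intro cs
  induction cs with
  | nil => intro cur; simp [Mrun]
  | cons c cs ih =>
    intro cur
    simp only [Mrun]
    split_ifs
    · exact le_max_left _ _
    · exact le_trans (by omega) (ih (cur + 1))

-- A's fold of max-length over the pieces, with `p` prepended to the head piece, is Mrun.
lemma fold_splitP (cs : List Char) : ∀ (p : List Char) (l : Int),
    ((splitP cs).modifyHead (fun h => p ++ h)).foldl
        (fun l j => max l (j.length : Int)) l
      = max l (Mrun cs (p.length : Int)) := by
  induction cs with
  | nil => intro p l; simp [splitP, List.modifyHead, Mrun]
  | cons x xs ih =>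
    intro p l
    by_cases hx : pySepB x
    · have h3 : splitP (x :: xs) = [] :: splitP xs := by simp [splitP, hx]
      rw [h3]
      simp only [List.modifyHead, List.append_nil, List.foldl_cons]
      have := ih [] (max l (p.length : Int))
      simp only [List.length_nil, Nat.cast_zero, List.nil_append] at this
      rw [show (splitP xs).modifyHead (fun h => h) = splitP xs by
        cases splitP xs <;> simp [List.modifyHead]] at this
      rw [this, Mrun, if_pos hx]
      omega
    · have h3 : splitP (x :: xs) = (splitP xs).modifyHead (x :: ·) := by
        simp [splitP, hx]
      rw [h3]
      have hcomp : ((splitP xs).modifyHead (x :: ·)).modifyHead (fun h => p ++ h)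
          = (splitP xs).modifyHead (fun h => (p ++ [x]) ++ h) := by
        cases splitP xs <;> simp [List.modifyHead]
      rw [hcomp, ih (p ++ [x]) l, Mrun, if_neg hx]
      have : ((p ++ [x]).length : Int) = (p.length : Int) + 1 := by simp
      rw [this]

-- Project A's (k, l) pair fold to a fold over l alone (inner loop).
lemma proj_inner (ps : List (List Char)) : ∀ (kl : Int × Int),
    (ps.foldl
      (fun (kl : Int × Int) j =>
        ((j.length : Int), if (j.length : Int) > kl.2 then (j.length : Int) else kl.2))
      kl).2
      = ps.foldl (fun l j => max l (j.length : Int)) kl.2 := by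
  induction ps with
  | nil => intro kl; rfl
  | cons j ps ih =>
    intro kl
    simp only [List.foldl_cons]
    rw [ih]
    congr 1
    simp only []
    split_ifs <;> omega

-- Project the outer (k, l) pair fold likewise.
lemma proj_outer (os : List (List Char)) : ∀ (kl : Int × Int),
    (os.foldl
      (fun (kl : Int × Int) i =>
        (splitC ' ' i).foldl
          (fun (kl : Int × Int) j =>
            ((j.length : Int), if (j.length : Int) > kl.2 then (j.length : Int) else kl.2))
          kl)
      kl).2
      = os.foldl (fun l i => (splitC ' ' i).foldl (fun l j => max l (j.length : Int)) l) kl.2 := by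
  induction os with
  | nil => intro kl; rfl
  | cons i os ih =>
    intro kl
    simp only [List.foldl_cons]
    rw [ih]
    congr 1
    exact proj_inner (splitC ' ' i) kl

-- A computes Mrun.
lemma mvl_eq_Mrun (text : String) : mvl text = Mrun text.toList 0 := by
  unfold mvl
  simp only [splitOn_eq]
  rw [proj_outer]
  rw [show (fun (l : Int) (i : List Char) =>
        (splitC ' ' i).foldl (fun l j => max l (j.length : Int)) l)
      = fun (l : Int) (i : List Char) =>
        ((fun i => splitC ' ' i) i).foldl (fun l j => max l (j.length : Int)) l from rfl]
  rw [← List.foldl_flatMap, flatMap_split]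
  have := fold_splitP text.toList [] 0
  simp only [List.length_nil, Nat.cast_zero, List.nil_append] at this
  rw [show (splitP text.toList).modifyHead (fun h => h) = splitP text.toList by
    cases splitP text.toList <;> simp [List.modifyHead]] at this
  rw [this]
  have := Mrun_ge text.toList 0
  omega

-- B's streaming fold computes Mrun.
lemma alt_fold (cs : List Char) : ∀ (cur best : Int), 0 ≤ cur → cur ≤ best →
    (cs.foldl
      (fun (cb : Int × Int) ch =>
        if ch = '.' ∨ ch = ' ' then ((0 : Int), cb.2)
        else (cb.1 + 1, max cb.2 (cb.1 + 1)))
      (cur, best)).2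
      = max best (Mrun cs cur) := by
  induction cs with
  | nil => intro cur best h0 hb; simp [Mrun]; omega
  | cons c cs ih =>
    intro cur best h0 hb
    by_cases hc : c = '.' ∨ c = ' '
    · have hsep : pySepB c = true := by
        rcases hc with h | h <;> simp [pySepB, h]
      simp only [List.foldl_cons, if_pos hc]
      rw [ih 0 best le_rfl (by omega), Mrun, if_pos hsep]
      omega
    · have hsep : pySepB c = false := by
        simp only [pySepB, Bool.or_eq_false_iff, decide_eq_false_iff_not]
        exact ⟨fun h => hc (Or.inl h), fun h => hc (Or.inr h)⟩
      simp only [List.foldl_cons, if_neg hc]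
      rw [ih (cur + 1) (max best (cur + 1)) (by omega) (by omega), Mrun, if_neg (by simp [hsep])]
      have := Mrun_ge cs (cur + 1)
      omega

lemma mvl_alt_eq_Mrun (text : String) : mvl_alt text = Mrun text.toList 0 := by
  unfold mvl_alt
  rw [alt_fold text.toList 0 0 le_rfl le_rfl]
  have := Mrun_ge text.toList 0
  omega

-- ===== VERDICT (by name: the statement is the Claim_ definition above) =====
theorem mvl_spec : Claim_equal_mvl := by
  intro text _
  unfold Spec_mvl
  rw [mvl_eq_Mrun, mvl_alt_eq_Mrun]
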